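-- pv_equiv track=rewrite | github.com/LP88888/699-capstone-team14 | src/preprocess_pipeline/ingredient_ner/utils.py | join_with_offsets
-- ===== SOURCE A (Python) =====
-- from typing import Any, List, Optional, Tuple, Union
--
-- def join_with_offsets(tokens: List[str], sep: str = ", "):
--     """Join tokens with a separator and track character offsets of each token."""
--     text, spans, pos = [], [], 0
--     for i, tok in enumerate(tokens):
--         start, end = pos, pos + len(tok)
--         text.append(tok)
--         spans.append((start, end))
--         pos = end
--         if i < len(tokens) - 1:
--             text.append(sep)
--             pos += len(sep)
--     return "".join(text), spans
-- ===== SOURCE B (Python) =====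
-- def join_with_offsets(tokens, sep=", "):
--     """Join tokens with a separator and track character offsets of each token."""
--     text = sep.join(tokens)
--     spans = []
--     pos = len(text)
--     for tok in reversed(tokens):
--         start = pos - len(tok)
--         spans.append((start, pos))
--         pos = start - len(sep)
--     return text, spans[::-1]
-- ===== Notes on version B (the rewrite author's own statement) =====
-- stated objective: alternative
-- what changed: B joins once with sep.join and then derives the spans back-to-front: it walks the tokens right-to-left starting from len(text), subtracting token and separator lengths, and reverses the collected spans, instead of A's left-to-right pass with a running position, interleaved text fragments and a last-token separator guard.
import Mathlib
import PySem

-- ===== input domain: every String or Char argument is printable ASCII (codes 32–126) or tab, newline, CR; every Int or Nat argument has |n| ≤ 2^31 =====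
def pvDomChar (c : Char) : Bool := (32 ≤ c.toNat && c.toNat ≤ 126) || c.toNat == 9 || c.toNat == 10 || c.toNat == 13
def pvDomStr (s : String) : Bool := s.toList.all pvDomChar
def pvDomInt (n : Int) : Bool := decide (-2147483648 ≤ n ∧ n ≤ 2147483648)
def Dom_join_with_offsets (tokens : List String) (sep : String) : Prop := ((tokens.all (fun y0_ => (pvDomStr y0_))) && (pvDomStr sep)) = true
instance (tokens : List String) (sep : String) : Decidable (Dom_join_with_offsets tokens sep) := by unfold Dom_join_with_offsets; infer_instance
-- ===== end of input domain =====

-- B joins once with sep.join, then derives the spans back-to-front: a right-to-left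
-- scan from len(text) subtracting token/separator lengths (objective: alternative).


-- ===== PORT A =====
def join_with_offsets (tokens : List String) (sep : String) : String × (List (Int × Int)) :=
  let n : Int := PySem.List.len tokens
  let r := (PySem.List.enumerate tokens 0).foldl
    (fun (st : List String × List (Int × Int) × Int) (p : Int × String) =>
      let text := st.1
      let spans := st.2.1
      let pos := st.2.2
      let i := p.1
      let tok := p.2
      let start := pos
      let e := pos + PySem.Str.len tok
      let text := text ++ [tok]
      let spans := spans ++ [(start, e)]
      let pos := e
      if i < n - 1 then (text ++ [sep], spans, pos + PySem.Str.len sep)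
      else (text, spans, pos)) ([], [], 0)
  (PySem.Str.join "" r.1, r.2.1)

-- ===== PORT B =====
def join_with_offsets_alt (tokens : List String) (sep : String) : String × (List (Int × Int)) :=
  let text := PySem.Str.join sep tokens
  let r := tokens.reverse.foldl
    (fun (st : List (Int × Int) × Int) (tok : String) =>
      let start := st.2 - PySem.Str.len tok
      (st.1 ++ [(start, st.2)], start - PySem.Str.len sep)) ([], PySem.Str.len text)
  (text, r.1.reverse)

-- ===== PRECONDITION & SPEC =====
def Spec_join_with_offsets (tokens : List String) (sep : String) (out : String × (List (Int × Int))) : Prop := out = join_with_offsets_alt tokens sep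
instance (tokens : List String) (sep : String) (out : String × (List (Int × Int))) : Decidable (Spec_join_with_offsets tokens sep out) := by unfold Spec_join_with_offsets; infer_instance

-- ===== CLAIM =====
def Claim_equal_join_with_offsets : Prop := ∀ (tokens : List String) (sep : String), Dom_join_with_offsets tokens sep → Spec_join_with_offsets tokens sep (join_with_offsets tokens sep)

-- ===== LEMMAS AND PROOFS =====

/-- A's loop body, written flat (definitionally equal to the lambda in the port). -/
def aStep (sep : String) (n : Int)
    (st : List String × List (Int × Int) × Int) (q : Int × String) :
    List String × List (Int × Int) × Int :=
  if q.1 < n - 1 then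
    (st.1 ++ [q.2] ++ [sep], st.2.1 ++ [(st.2.2, st.2.2 + PySem.Str.len q.2)],
      st.2.2 + PySem.Str.len q.2 + PySem.Str.len sep)
  else
    (st.1 ++ [q.2], st.2.1 ++ [(st.2.2, st.2.2 + PySem.Str.len q.2)],
      st.2.2 + PySem.Str.len q.2)

/-- B's loop body, written flat (definitionally equal to the lambda in the port). -/
def bStep (sep : String) (st : List (Int × Int) × Int) (tok : String) :
    List (Int × Int) × Int :=
  (st.1 ++ [(st.2 - PySem.Str.len tok, st.2)], st.2 - PySem.Str.len tok - PySem.Str.len sep)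

/-- Spans of the tokens when laid out starting at `pos`, separated by `sep`. -/
def spansOf (sep : String) : List String → Int → List (Int × Int)
  | [], _ => []
  | t :: rest, pos =>
      (pos, pos + PySem.Str.len t) :: spansOf sep rest (pos + PySem.Str.len t + PySem.Str.len sep)

/-- The fragment list A builds: tokens interleaved with `sep`. -/
def fragsOf (sep : String) : List String → List String
  | [] => []
  | [t] => [t]
  | t :: u :: rest => t :: sep :: fragsOf sep (u :: rest)

/-- Total length of the joined text. -/
def tlen (sep : String) : List String → Int
  | [] => 0
  | [t] => PySem.Str.len t
  | t :: u :: rest => PySem.Str.len t + PySem.Str.len sep + tlen sep (u :: rest)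

theorem aFold_spec (sep : String) (n : Int) (toks : List String) :
    ∀ (k : Int) (text : List String) (spans : List (Int × Int)) (pos : Int),
      k + (toks.length : Int) = n →
      ∃ p,
        (PySem.List.enumerate toks k).foldl (aStep sep n) (text, spans, pos)
        = (text ++ fragsOf sep toks, spans ++ spansOf sep toks pos, p) := by
  induction toks with
  | nil =>
      intro k text spans pos _
      exact ⟨pos, by simp [PySem.List.enumerate_nil, fragsOf, spansOf]⟩
  | cons t rest ih =>
      intro k text spans pos hk
      cases rest with
      | nil =>
          refine ⟨pos + PySem.Str.len t, ?_⟩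
          have hlt : ¬ (k < n - 1) := by simp at hk; omega
          simp [PySem.List.enumerate_cons, PySem.List.enumerate_nil, aStep, hlt,
            fragsOf, spansOf]
      | cons u rest' =>
          have hlt : k < n - 1 := by
            simp only [List.length_cons] at hk; push_cast at hk; omega
          have hk' : (k + 1) + ((u :: rest').length : Int) = n := by
            simp only [List.length_cons] at hk ⊢; push_cast at hk ⊢; omega
          obtain ⟨p, hp⟩ := ih (k + 1) (text ++ [t] ++ [sep])
            (spans ++ [(pos, pos + PySem.Str.len t)])
            (pos + PySem.Str.len t + PySem.Str.len sep) hk'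
          refine ⟨p, ?_⟩
          rw [PySem.List.enumerate_cons, List.foldl_cons]
          have hstep : aStep sep n (text, spans, pos) (k, t)
              = (text ++ [t] ++ [sep], spans ++ [(pos, pos + PySem.Str.len t)],
                 pos + PySem.Str.len t + PySem.Str.len sep) := by
            simp [aStep, hlt]
          rw [hstep, hp]
          simp [fragsOf, spansOf]

theorem joinOne (sep t : String) : PySem.Str.join sep [t] = t :=
  String.toList_inj.mp (by simp [PySem.Str.toList_join, PySem.Chars.join_singleton])

theorem joinTwo (sep t : String) (u : String) (rest' : List String) :
    PySem.Str.join sep [t, PySem.Str.join sep (u :: rest')] = PySem.Str.join sep (t :: u :: rest') := by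
  apply String.toList_inj.mp
  simp only [PySem.Str.toList_join, List.map_cons, List.map_nil]
  rw [PySem.Chars.join_cons_cons, PySem.Chars.join_cons_cons, PySem.Chars.join_singleton]

theorem joinFrags (sep : String) (toks : List String) :
    PySem.Str.join "" (fragsOf sep toks) = PySem.Str.join sep toks := by
  induction toks with
  | nil => rfl
  | cons t rest ih =>
      cases rest with
      | nil => rfl
      | cons u rest' =>
          have h1 : fragsOf sep (t :: u :: rest') = t :: sep :: fragsOf sep (u :: rest') := rfl
          apply String.toList_inj.mp
          rw [h1]
          simp only [PySem.Str.toList_join, List.map_cons]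
          cases h : fragsOf sep (u :: rest') with
          | nil => cases rest' <;> simp_all [fragsOf]
          | cons f fs =>
              have ih' := congrArg String.toList ih
              rw [h] at ih'
              simp only [PySem.Str.toList_join, List.map_cons] at ih' ⊢
              rw [show ("" : String).toList = [] from rfl] at ih'
              rw [PySem.Chars.join_cons_cons, PySem.Chars.join_cons_cons,
                  PySem.Chars.join_cons_cons]
              simp [ih']

theorem lenJoinPair (sep a b : String) :
    PySem.Str.len (PySem.Str.join sep [a, b])
      = PySem.Str.len a + PySem.Str.len sep + PySem.Str.len b := by
  have h : (PySem.Str.join sep [a, b]).toList = a.toList ++ sep.toList ++ b.toList := by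
    simp only [PySem.Str.toList_join, List.map_cons, List.map_nil]
    rw [PySem.Chars.join_cons_cons, PySem.Chars.join_singleton]
  simp [PySem.Str.len, h]
  ring

theorem len_join (sep : String) : ∀ toks : List String,
    PySem.Str.len (PySem.Str.join sep toks) = tlen sep toks := by
  intro toks
  induction toks with
  | nil => rfl
  | cons t rest ih =>
      cases rest with
      | nil => simp [joinOne, tlen]
      | cons u rest' =>
          rw [← joinTwo sep t u rest', tlen, ← ih, lenJoinPair]

/-- B's right-to-left fold recovers the reversed spans when started at `pos + tlen`. -/
theorem bFold_spec (sep : String) : ∀ (toks : List String) (pos : Int), toks ≠ [] →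
    toks.foldr (fun tok st => bStep sep st tok) ([], pos + tlen sep toks)
      = ((spansOf sep toks pos).reverse, pos - PySem.Str.len sep) := by
  intro toks
  induction toks with
  | nil => intro pos h; exact absurd rfl h
  | cons t rest ih =>
      intro pos _
      cases rest with
      | nil =>
          simp [tlen, bStep, spansOf]
      | cons u rest' =>
          have harith : pos + tlen sep (t :: u :: rest')
              = (pos + PySem.Str.len t + PySem.Str.len sep) + tlen sep (u :: rest') := by
            rw [tlen]; ring
          rw [List.foldr_cons, harith,
            ih (pos + PySem.Str.len t + PySem.Str.len sep) (by simp)]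
          simp [bStep, spansOf]

-- ===== VERDICT =====
theorem join_with_offsets_spec : Claim_equal_join_with_offsets := by
  intro tokens sep _
  unfold Spec_join_with_offsets
  have hA : join_with_offsets tokens sep
      = (PySem.Str.join ""
          ((PySem.List.enumerate tokens 0).foldl
            (aStep sep (PySem.List.len tokens)) ([], [], 0)).1,
         ((PySem.List.enumerate tokens 0).foldl
            (aStep sep (PySem.List.len tokens)) ([], [], 0)).2.1) := rfl
  have hB : join_with_offsets_alt tokens sep
      = (PySem.Str.join sep tokens,
         (tokens.reverse.foldl (bStep sep)
           ([], PySem.Str.len (PySem.Str.join sep tokens))).1.reverse) := rfl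
  obtain ⟨p, hp⟩ := aFold_spec sep (PySem.List.len tokens) tokens 0 [] [] 0 (by simp)
  rw [hA, hB, hp, List.foldl_reverse]
  cases tokens with
  | nil => simp [joinFrags, spansOf]
  | cons t rest =>
      rw [len_join, show tlen sep (t :: rest) = 0 + tlen sep (t :: rest) by ring,
        bFold_spec sep (t :: rest) 0 (by simp)]
      simp [joinFrags]
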